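-- pv_equiv track=rewrite | github.com/shadowshard4080/shadowbot | bot.py | determine_current_role
-- ===== SOURCE A (Python) =====
-- def determine_current_role(level):
--     role_mapping = {
--         1: "Apprentice",
--         25: "Active Member",
--         100: "Veteran",
--         250: "Godlike"
--     }
--
--     # Find the highest role level that the user has reached
--     current_role = None
--     for xp_threshold, role_name in sorted(role_mapping.items(), reverse=True):
--         if level >= xp_threshold:
--             current_role = role_name
--             break
--
--     return current_role
-- ===== SOURCE B (Python) =====
-- def determine_current_role(level):
--     # Binary search (bisect_right) over ascending thresholds; index into a names table.
--     thresholds = (1, 25, 100, 250)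
--     names = (None, "Apprentice", "Active Member", "Veteran", "Godlike")
--     lo, hi = 0, len(thresholds)
--     while lo < hi:
--         mid = (lo + hi) // 2
--         if thresholds[mid] <= level:
--             lo = mid + 1
--         else:
--             hi = mid
--     return names[lo]
-- ===== Notes on version B (the rewrite author's own statement) =====
-- stated objective: alternative
-- what changed: Replaces the dict construction, descending sort and first-match break-loop with a hand-written binary search (bisect_right) over an ascending threshold tuple whose result indexes a names table; no descending scan occurs.
import Mathlib
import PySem

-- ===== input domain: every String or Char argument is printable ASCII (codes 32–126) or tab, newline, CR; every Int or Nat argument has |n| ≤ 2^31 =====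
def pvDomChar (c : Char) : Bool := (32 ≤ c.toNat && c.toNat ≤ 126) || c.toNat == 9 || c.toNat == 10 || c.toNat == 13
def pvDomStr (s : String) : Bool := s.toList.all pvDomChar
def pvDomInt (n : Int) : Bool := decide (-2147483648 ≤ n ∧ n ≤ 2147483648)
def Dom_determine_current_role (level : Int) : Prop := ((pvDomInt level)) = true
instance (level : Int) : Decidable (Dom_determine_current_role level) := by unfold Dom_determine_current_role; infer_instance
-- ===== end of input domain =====

-- B replaces A's dict + descending sort + first-match break-loop with a binary search
-- (bisect_right) over ascending thresholds indexing a names table (alternative algorithm).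

-- ===== PORT A =====
-- loop with break over the sorted items
def pvLoopA (level : Int) : List (Int × String) → Option String
  | [] => none
  | (t, name) :: rest => if level ≥ t then some name else pvLoopA level rest

def determine_current_role (level : Int) : Option String :=
  let role_mapping : PySem.Dict Int String :=
    (((PySem.Dict.empty.insert 1 "Apprentice").insert 25 "Active Member").insert 100 "Veteran").insert 250 "Godlike"
  -- dict keys are distinct, so Python's lexicographic tuple sort = sort by first component
  pvLoopA level (PySem.List.sorted role_mapping.items (fun p => p.1) true)

-- ===== PORT B =====
def pvThresholdsB : List Int := [1, 25, 100, 250]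
def pvNamesB : List (Option String) :=
  [none, some "Apprentice", some "Active Member", some "Veteran", some "Godlike"]

-- the while-loop: lo < hi is the guard, hi - lo decreases; mid index is always in range
def pvBisectB (level : Int) (lo hi : Nat) : Nat :=
  if lo < hi then
    let mid := (lo + hi) / 2
    if pvThresholdsB.getD mid 0 ≤ level then pvBisectB level (mid + 1) hi
    else pvBisectB level lo mid
  else lo
termination_by hi - lo
decreasing_by all_goals omega

def determine_current_role_alt (level : Int) : Option String :=
  pvNamesB.getD (pvBisectB level 0 pvThresholdsB.length) none

-- ===== PRECONDITION & SPEC =====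
def Spec_determine_current_role (level : Int) (out : Option String) : Prop := out = determine_current_role_alt level
instance (level : Int) (out : Option String) : Decidable (Spec_determine_current_role level out) := by unfold Spec_determine_current_role; infer_instance

-- ===== CLAIM (what is proved, stated in full; the proofs are below) =====
def Claim_equal_determine_current_role : Prop := ∀ (level : Int), Dom_determine_current_role level → Spec_determine_current_role level (determine_current_role level)

-- ===== LEMMAS AND PROOFS =====
theorem pvSortedItems :
    (let role_mapping : PySem.Dict Int String :=
      (((PySem.Dict.empty.insert 1 "Apprentice").insert 25 "Active Member").insert 100 "Veteran").insert 250 "Godlike"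
    PySem.List.sorted role_mapping.items (fun p => p.1) true)
      = [((250:Int), "Godlike"), (100, "Veteran"), (25, "Active Member"), (1, "Apprentice")] := by decide

-- ===== VERDICT (by name: the statement is the Claim_ definition above) =====
theorem determine_current_role_spec : Claim_equal_determine_current_role := by
  intro level _
  unfold Spec_determine_current_role determine_current_role determine_current_role_alt
  simp only [pvSortedItems, pvLoopA, pvThresholdsB]
  by_cases h250 : (250:Int) ≤ level
  · have h1 : (1:Int) ≤ level := by omega
    have h25 : (25:Int) ≤ level := by omega
    have h100 : (100:Int) ≤ level := by omega
    simp [pvBisectB, pvThresholdsB, pvNamesB, h1, h100, h250, ge_iff_le]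
  · by_cases h100 : (100:Int) ≤ level
    · have h25 : (25:Int) ≤ level := by omega
      simp [pvBisectB, pvThresholdsB, pvNamesB, h100, h250, ge_iff_le]
    · by_cases h25 : (25:Int) ≤ level
      · have h1 : (1:Int) ≤ level := by omega
        simp [pvBisectB, pvThresholdsB, pvNamesB, h25, h100, h250, ge_iff_le]
      · by_cases h1 : (1:Int) ≤ level
        · simp [pvBisectB, pvThresholdsB, pvNamesB, h1, h25, h100, h250, ge_iff_le]
        · simp [pvBisectB, pvThresholdsB, pvNamesB, h1, h25, h100, h250, ge_iff_le]
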